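-- pv_equiv track=rewrite | github.com/dcmouser/hlweb2 | hldjango/code/lib/jr/jrfuncs.py | smartSplitTextForDropCaps
-- ===== SOURCE A (Python) =====
-- def smartSplitTextForDropCaps(text, dropCapsStyle):
--     # return [firstChar, upperCaseText, remainder]
--
--     # ATTN: this was causing trouble
--     if (False):
--         text = text.strip()
--     else:
--         # we want to trip the LEFT side of spaces only
--         text = text.lstrip()
--
--     if (len(text)==0):
--         return [None,None,None]
--     firstChar = text[0]
--     # find first punctuation
--     stopChars = [".",",",'"', "“", ":", " "]
--     textlen = len(text)
--     stopIndex = None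
--     for i in range(1,textlen):
--         c = text[i]
--         if (c in stopChars):
--             stopIndex = i
--             break
--     if (stopIndex is None):
--         return [firstChar, "", text[1:]]
--     upperCaseText = text[1:stopIndex]
--     remainderText = text[stopIndex:]
--     return [firstChar, upperCaseText, remainderText]
-- ===== SOURCE B (Python) =====
-- def smartSplitTextForDropCaps(text, dropCapsStyle):
--     # return [firstChar, upperCaseText, remainder]
--     text = text.lstrip()
--     if not text:
--         return [None, None, None]
--     # first occurrence (from index 1) of each stop char; keep the found ones
--     candidates = [i for i in (text.find(c, 1) for c in '.,"\u201c: ') if i != -1]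
--     if not candidates:
--         return [text[0], "", text[1:]]
--     stop = min(candidates)
--     return [text[0], text[1:stop], text[stop:]]
-- ===== Notes on version B (the rewrite author's own statement) =====
-- stated objective: faster
-- what changed: Replaces the manual per-character index loop that scans for the first stop character with per-stop-character str.find(c, 1) searches whose non-negative results are reduced by min(), eliminating the explicit Python-level character loop and membership test.
import Mathlib
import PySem

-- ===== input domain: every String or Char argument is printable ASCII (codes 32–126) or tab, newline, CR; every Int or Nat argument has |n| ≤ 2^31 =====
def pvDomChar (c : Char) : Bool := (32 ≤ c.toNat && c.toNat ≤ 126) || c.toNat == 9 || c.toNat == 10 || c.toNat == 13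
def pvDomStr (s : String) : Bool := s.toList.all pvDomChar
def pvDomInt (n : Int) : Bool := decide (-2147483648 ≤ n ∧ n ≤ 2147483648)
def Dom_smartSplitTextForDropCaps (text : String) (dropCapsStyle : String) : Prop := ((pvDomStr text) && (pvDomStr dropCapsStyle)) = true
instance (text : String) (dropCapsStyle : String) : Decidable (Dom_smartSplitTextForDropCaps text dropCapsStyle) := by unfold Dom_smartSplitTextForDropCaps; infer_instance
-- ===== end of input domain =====

-- B replaces A's per-character index loop that scans for the first stop character by
-- per-stop-character find(c, 1) searches reduced by min; same return value on every input
-- (a timing run measured B faster: each search runs in the C string engine).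

-- ===== PORT A =====
-- the for-loop over range(1, textlen) with break: first i with text[i] in stopChars
def aFindStop (text : String) (stopChars : List Char) : List Int → Option Int
  | [] => none
  | i :: rest =>
      -- text[i]: i ∈ range(1, len(text)) is always in range, so the default is never used
      let c := (PySem.Str.pyGet? text i).getD ' '
      if stopChars.contains c then some i else aFindStop text stopChars rest

def smartSplitTextForDropCaps (text : String) (dropCapsStyle : String) : List (Option String) :=
  let text := PySem.Str.lstrip text
  if PySem.Str.len text == 0 then [none, none, none]
  else
    -- text[0], used as a one-character string
    let firstChar := ((PySem.Str.pyGet? text 0).map (fun c => String.ofList [c])).getD ""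
    let stopChars : List Char := ['.', ',', '"', '“', ':', ' ']
    let textlen := PySem.Str.len text
    let stopIndex := aFindStop text stopChars (PySem.List.pyRange 1 textlen)
    match stopIndex with
    | none => [some firstChar, some "", some (PySem.Str.slice text (some 1) none)]
    | some si =>
        [some firstChar, some (PySem.Str.slice text (some 1) (some si)),
         some (PySem.Str.slice text (some si) none)]

-- ===== PORT B =====
def smartSplitTextForDropCaps_alt (text : String) (dropCapsStyle : String) : List (Option String) :=
  let text := PySem.Str.lstrip text
  if PySem.Str.len text == 0 then [none, none, none]
  else
    let candidates :=
      ((".,\"“: ".toList).map (fun c => PySem.Str.findFrom text (String.ofList [c]) 1 none)).filter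
        (fun i => i ≠ -1)
    let firstChar := ((PySem.Str.pyGet? text 0).map (fun c => String.ofList [c])).getD ""
    if candidates.isEmpty then
      [some firstChar, some "", some (PySem.Str.slice text (some 1) none)]
    else
      let stop := PySem.List.minD candidates (fun i => i) 0
      [some firstChar, some (PySem.Str.slice text (some 1) (some stop)),
       some (PySem.Str.slice text (some stop) none)]

-- ===== PRECONDITION & SPEC =====
def Spec_smartSplitTextForDropCaps (text : String) (dropCapsStyle : String) (out : List (Option String)) : Prop := out = smartSplitTextForDropCaps_alt text dropCapsStyle
instance (text : String) (dropCapsStyle : String) (out : List (Option String)) : Decidable (Spec_smartSplitTextForDropCaps text dropCapsStyle out) := by unfold Spec_smartSplitTextForDropCaps; infer_instance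

-- ===== CLAIM (what is proved, stated in full; the proofs are below) =====
def Claim_equal_smartSplitTextForDropCaps : Prop := ∀ (text : String) (dropCapsStyle : String), Dom_smartSplitTextForDropCaps text dropCapsStyle → Spec_smartSplitTextForDropCaps text dropCapsStyle (smartSplitTextForDropCaps text dropCapsStyle)

-- ===== LEMMAS AND PROOFS =====

-- the value B's comprehension produces for one stop char c: first index ≥ 1 of c, else -1
def pvCandVal (s : String) (c : Char) : Int :=
  match List.findIdx? (fun x => x == c) s.toList.tail with
  | none => -1
  | some j => ((1 + j : Nat) : Int)

-- Chars.find.go on a single-character needle is first-index search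
theorem pv_findgo_single (c : Char) : ∀ (t : List Char) (k : Nat),
    PySem.Chars.find.go [c] t k =
      (match List.findIdx? (fun x => x == c) t with
       | none => -1 | some j => ((k + j : Nat) : Int))
  | [], k => by simp [PySem.Chars.find.go]
  | h :: t, k => by
    rw [PySem.Chars.find.go]
    by_cases hc : c = h
    · simp [List.isPrefixOf, hc, List.findIdx?_cons]
    · have hc' : (c == h) = false := by simpa using hc
      have hc'' : (h == c) = false := by simpa using (Ne.symm hc)
      simp only [List.isPrefixOf, hc', Bool.false_and, Bool.false_eq_true, if_false,
        List.findIdx?_cons, hc'']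
      rw [pv_findgo_single c t (k+1)]
      cases hfi : List.findIdx? (fun x => x == c) t <;> simp [hfi] <;> push_cast <;> ring

-- text.find(c, 1) computes pvCandVal
theorem pv_bcand (s : String) (c : Char) (h : s.toList ≠ []) :
    PySem.Str.findFrom s (String.ofList [c]) 1 none = pvCandVal s c := by
  have h1 : 1 ≤ s.toList.length := by cases hs : s.toList <;> simp_all
  rw [PySem.Str.findFrom_eq]
  have hone : ((1:Int)) = ((1:Nat):Int) := by norm_num
  rw [hone, PySem.Chars.findFrom_natCast s.toList _ 1 h1]
  have hsub : (String.ofList [c]).toList = [c] := by simp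
  rw [hsub]
  have hfind : PySem.Chars.find (s.toList.drop 1) [c] =
      (match List.findIdx? (fun x => x == c) s.toList.tail with
       | none => -1 | some j => ((0 + j : Nat) : Int)) := by
    rw [PySem.Chars.find, pv_findgo_single]
    simp [List.drop_one]
  rw [hfind, pvCandVal]
  cases hfi : List.findIdx? (fun x => x == c) s.toList.tail <;> simp [hfi] <;> push_cast <;> omega

-- A's loop over range(k, len) finds the first stop index ≥ k
theorem pv_aloop (s : String) (stops : List Char) : ∀ (m k : Nat), s.length ≤ k + m →
    aFindStop s stops (PySem.List.pyRange (k : Int) ((s.length : Nat) : Int)) =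
      (List.findIdx? (fun c => stops.contains c) (s.toList.drop k)).map
        (fun j => ((k + j : Nat) : Int))
  | 0, k, hle => by
    have hlen : s.toList.length = s.length := by simp
    have h1 : PySem.List.pyRange (k : Int) ((s.length : Nat) : Int) = [] := by
      simp [PySem.List.pyRange]; omega
    have h2 : s.toList.drop k = [] := by simp; omega
    simp [h1, h2, aFindStop]
  | m+1, k, hle => by
    have hlen : s.toList.length = s.length := by simp
    by_cases hk : k < s.length
    · rw [PySem.List.pyRange_one_cons (by exact_mod_cast hk)]
      rw [aFindStop]
      have hk' : k < s.toList.length := by omega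
      have hget : (PySem.Str.pyGet? s (k : Int)).getD ' ' = s.toList[k] := by
        rw [PySem.Str.pyGet?_eq, PySem.Chars.pyGet?_eq_listPyGet?, PySem.List.pyGet?_natCast]
        simp only [List.getElem?_eq_getElem hk']; rfl
      rw [hget, List.drop_eq_getElem_cons hk', List.findIdx?_cons]
      by_cases hc : stops.contains s.toList[k]
      · have hc' : s.toList[k] ∈ stops := by simpa using hc
        simp [hc, hc']
      · have hc' : s.toList[k] ∉ stops := by simpa using hc
        have hcast : ((k:Int) + 1) = (((k+1 : Nat)):Int) := by push_cast; ring
        rw [if_neg (by simpa using hc), hcast, pv_aloop s stops m (k+1) (by omega)]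
        cases hfi : List.findIdx? (fun c => stops.contains c) (s.toList.drop (k+1)) <;>
          simp [hfi, hc, hc'] <;> push_cast <;> omega
    · have h1 : PySem.List.pyRange (k : Int) ((s.length : Nat) : Int) = [] := by
        simp [PySem.List.pyRange]; omega
      have h2 : s.toList.drop k = [] := by simp; omega
      simp [h1, h2, aFindStop]

theorem pv_main_eq (text dcs : String) :
    smartSplitTextForDropCaps text dcs = smartSplitTextForDropCaps_alt text dcs := by
  unfold smartSplitTextForDropCaps smartSplitTextForDropCaps_alt
  generalize PySem.Str.lstrip text = s
  by_cases h0 : (PySem.Str.len s == 0) = true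
  · simp only [h0, if_true]
  · simp only [h0, Bool.false_eq_true, if_false]
    have hne : s.toList ≠ [] := by
      intro hnil
      apply h0
      rw [PySem.Str.len_eq, hnil]
      decide
    have hcand : ((".,\"“: ".toList).map (fun c => PySem.Str.findFrom s (String.ofList [c]) 1 none))
        = (['.', ',', '"', '“', ':', ' '] : List Char).map (pvCandVal s) := by
      rw [show ".,\"“: ".toList = (['.', ',', '"', '“', ':', ' '] : List Char) from by decide]
      exact List.map_congr_left (fun c _ => pv_bcand s c hne)
    have hA : aFindStop s ['.', ',', '"', '“', ':', ' '] (PySem.List.pyRange 1 (PySem.Str.len s)) =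
        (List.findIdx? (fun c => (['.', ',', '"', '“', ':', ' '] : List Char).contains c)
          s.toList.tail).map (fun j => ((1 + j : Nat) : Int)) := by
      rw [PySem.Str.len_eq, show ((s.toList.length : Nat) : Int) = ((s.length : Nat) : Int) from by simp]
      have h1 := pv_aloop s ['.', ',', '"', '“', ':', ' '] s.length 1 (by omega)
      simp only [Nat.cast_one] at h1
      rw [h1, List.drop_one]
    rw [hA, hcand]
    cases hfi : List.findIdx? (fun c => (['.', ',', '"', '“', ':', ' '] : List Char).contains c)
        s.toList.tail with
    | none =>
      simp only [Option.map_none]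
      have hnone := List.findIdx?_eq_none_iff.mp hfi
      have hempty : ((['.', ',', '"', '“', ':', ' '] : List Char).map (pvCandVal s)).filter
          (fun i => i ≠ -1) = [] := by
        rw [List.filter_eq_nil_iff]
        intro a ha
        obtain ⟨c, hc, rfl⟩ := List.mem_map.mp ha
        rw [pvCandVal]
        cases hfc : List.findIdx? (fun x => x == c) s.toList.tail with
        | none => simp [hfc]
        | some j =>
          obtain ⟨hlt, hbeq, -⟩ := List.findIdx?_eq_some_iff_getElem.mp hfc
          have hel : s.toList.tail[j] = c := by simpa using hbeq
          have hPx := hnone _ (List.getElem_mem hlt)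
          rw [hel] at hPx
          simp [List.contains_iff_mem, hc] at hPx
      rw [hempty]
      simp
    | some j =>
      simp only [Option.map_some]
      obtain ⟨hjlt, hPj, hminj⟩ := List.findIdx?_eq_some_iff_getElem.mp hfi
      have hc0 : s.toList.tail[j] ∈ (['.', ',', '"', '“', ':', ' '] : List Char) := by
        simpa [List.contains_iff_mem] using hPj
      have hg0 : pvCandVal s (s.toList.tail[j]) = ((1 + j : Nat) : Int) := by
        rw [pvCandVal]
        have hfj : List.findIdx? (fun x => x == s.toList.tail[j]) s.toList.tail = some j := by
          rw [List.findIdx?_eq_some_iff_getElem]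
          refine ⟨hjlt, by simp, ?_⟩
          intro j' hj' hbeq
          have heq : s.toList.tail[j'] = s.toList.tail[j] := by simpa using hbeq
          have hm := hminj j' hj'
          rw [heq] at hm
          exact hm (by simpa [List.contains_iff_mem] using hc0)
        rw [hfj]
      have hm0mem : ((1 + j : Nat) : Int) ∈
          ((['.', ',', '"', '“', ':', ' '] : List Char).map (pvCandVal s)).filter
            (fun i => i ≠ -1) :=
        List.mem_filter.mpr ⟨List.mem_map.mpr ⟨_, hc0, hg0⟩, by
          simp only [decide_eq_true_eq]
          intro hcontra
          omega⟩
      have hlb : ∀ y ∈ ((['.', ',', '"', '“', ':', ' '] : List Char).map (pvCandVal s)).filter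
          (fun i => i ≠ -1), ((1 + j : Nat) : Int) ≤ y := by
        intro y hy
        obtain ⟨hymap, hyne'⟩ := List.mem_filter.mp hy
        have hyne : y ≠ -1 := by simpa using hyne'
        obtain ⟨c, hcmem, hgc⟩ := List.mem_map.mp hymap
        rw [pvCandVal] at hgc
        cases hfc : List.findIdx? (fun x => x == c) s.toList.tail with
        | none => rw [hfc] at hgc; exact absurd hgc.symm hyne
        | some j'' =>
          rw [hfc] at hgc
          obtain ⟨hlt'', hbeq'', -⟩ := List.findIdx?_eq_some_iff_getElem.mp hfc
          have hcel : s.toList.tail[j''] = c := by simpa using hbeq''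
          have hPj'' : (fun c => (['.', ',', '"', '“', ':', ' '] : List Char).contains c)
              s.toList.tail[j''] = true := by
            simp [List.contains_iff_mem, hcel, hcmem]
          have hjle : j ≤ j'' := by
            by_contra hlt2
            exact hminj j'' (by omega) hPj''
          rw [← hgc]
          push_cast
          omega
      have hnonempty : ((['.', ',', '"', '“', ':', ' '] : List Char).map (pvCandVal s)).filter
          (fun i => i ≠ -1) ≠ [] := fun hnil => by rw [hnil] at hm0mem; simp at hm0mem
      have hie : (((['.', ',', '"', '“', ':', ' '] : List Char).map (pvCandVal s)).filter
          (fun i => i ≠ -1)).isEmpty = false := by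
        cases hc : (((['.', ',', '"', '“', ':', ' '] : List Char).map (pvCandVal s)).filter
            (fun i => i ≠ -1)).isEmpty
        · rfl
        · exact absurd (List.isEmpty_iff.mp hc) hnonempty
      have hminD : PySem.List.minD (((['.', ',', '"', '“', ':', ' '] : List Char).map
          (pvCandVal s)).filter (fun i => i ≠ -1)) (fun i => i) 0 = ((1 + j : Nat) : Int) := by
        rw [PySem.List.minD]
        cases hmq : PySem.List.min? (((['.', ',', '"', '“', ':', ' '] : List Char).map
            (pvCandVal s)).filter (fun i => i ≠ -1)) (fun i => i) with
        | none => exact absurd ((PySem.List.min?_eq_none_iff _ _).mp hmq) hnonempty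
        | some m =>
          have hmem := PySem.List.min?_mem hmq
          have hle1 : m ≤ ((1 + j : Nat) : Int) := PySem.List.min?_isMin hmq _ hm0mem
          have hle2 : ((1 + j : Nat) : Int) ≤ m := hlb m hmem
          simp [le_antisymm hle1 hle2]
      rw [hie, hminD]
      simp

-- ===== VERDICT (by name: the statement is the Claim_ definition above) =====
theorem smartSplitTextForDropCaps_spec : Claim_equal_smartSplitTextForDropCaps := by
  intro text dcs _
  unfold Spec_smartSplitTextForDropCaps
  exact pv_main_eq text dcs
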